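-- pv_equiv track=rewrite | github.com/miliar/Code_Jam_Webscraper | solutions_python/Problem_178/4210.py | count_blank_groups
-- ===== SOURCE A (Python) =====
-- def count_blank_groups(str):
--     i, sequence, result = 0, 0, 0
--     for s in str:
--         if s == '-':
--             sequence += 1
--         else:
--             result += 1 if sequence > 0 else False
--             sequence = 0
--         i += 1
--     result += 1 if sequence > 0 else False
--     if result == 1 and str[0] == '-' and str.count('+') > 0:
--         result = 0
--     return result
-- ===== SOURCE B (Python) =====
-- def count_blank_groups(str):
--     # Stage 1: project every non-dash character to a space.
--     # Stage 2: whitespace-split the projected string; the pieces are exactly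
--     # the maximal dash runs, so their number is the run count.
--     result = len(''.join(('-' if c == '-' else ' ') for c in str).split())
--     if result == 1 and str[0] == '-' and str.count('+') > 0:
--         result = 0
--     return result
-- ===== Notes on version B (the rewrite author's own statement) =====
-- stated objective: idiomatic
-- what changed: Replaces the stateful char-by-char run-length counter (sequence/result accumulators with a trailing flush) by staged passes: project every non-dash character to a space, whitespace-split the projected string, and count the resulting pieces (the maximal dash runs); the special-case guard is kept.
import Mathlib
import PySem

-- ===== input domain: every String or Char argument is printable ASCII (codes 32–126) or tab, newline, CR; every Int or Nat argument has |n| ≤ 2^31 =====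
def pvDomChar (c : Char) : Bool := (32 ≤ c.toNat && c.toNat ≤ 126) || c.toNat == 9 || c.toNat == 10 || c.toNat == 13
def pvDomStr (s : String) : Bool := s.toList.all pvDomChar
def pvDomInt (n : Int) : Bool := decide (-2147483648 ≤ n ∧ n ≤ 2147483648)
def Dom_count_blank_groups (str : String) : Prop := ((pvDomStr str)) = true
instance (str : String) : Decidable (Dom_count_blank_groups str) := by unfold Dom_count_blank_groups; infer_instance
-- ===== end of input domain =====

-- B replaces A's stateful run-length counter by staged passes: project non-dash chars to
-- spaces, whitespace-split, count pieces (same O(n) cost; objective: more idiomatic decomposition).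


-- ===== PORT A =====
-- Literal port of A's loop state (sequence, result); the unused counter i is dropped.
-- str[0] is ported as head? == some '-': the guard is only reached with result == 1,
-- which forces a nonempty string, so Python's IndexError is unreachable.
-- str.count('+') is exact as toList.count '+' for the single-char needle.
def count_blank_groups (str : String) : Int :=
  let st := str.toList.foldl
    (fun (st : Int × Int) s =>
      if s == '-' then (st.1 + 1, st.2)
      else (0, st.2 + (if st.1 > 0 then 1 else 0)))
    (0, 0)
  let result := st.2 + (if st.1 > 0 then 1 else 0)
  if result == 1 && (str.toList.head? == some '-') && (str.toList.count '+' > 0) then 0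
  else result

-- ===== PORT B =====
-- project non-dash characters to ' ', split on whitespace (PySem.Chars.split₀ = str.split()),
-- count the pieces; str[0] ported as head? (guard reached only on nonempty strings, as in A).
def count_blank_groups_alt (str : String) : Int :=
  let result : Int :=
    (PySem.Chars.split₀ (str.toList.map (fun c => if c == '-' then '-' else ' '))).length
  if result == 1 && (str.toList.head? == some '-') && (str.toList.count '+' > 0) then 0
  else result

-- ===== PRECONDITION & SPEC =====
def Spec_count_blank_groups (str : String) (out : Int) : Prop := out = count_blank_groups_alt str
instance (str : String) (out : Int) : Decidable (Spec_count_blank_groups str out) := by unfold Spec_count_blank_groups; infer_instance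

-- ===== CLAIM =====
def Claim_equal_count_blank_groups : Prop := ∀ (str : String), Dom_count_blank_groups str → Spec_count_blank_groups str (count_blank_groups str)

-- ===== LEMMAS AND PROOFS =====

-- split₀.go over the projected list counts exactly what A's flushed fold counts:
-- cur ≠ [] iff we are inside a dash run (seq > 0).
theorem pv_go (l : List Char) : ∀ (cur : List Char) (acc : List (List Char)) (seq res : Int),
    0 ≤ seq → (cur.isEmpty = decide (seq ≤ 0)) →
    ((PySem.Chars.split₀.go (l.map (fun c => if c == '-' then '-' else ' ')) cur acc).length : Int)
      = acc.length +
        (let st := l.foldl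
          (fun (st : Int × Int) s =>
            if s == '-' then (st.1 + 1, st.2)
            else (0, st.2 + (if st.1 > 0 then 1 else 0))) (seq, res)
         st.2 + (if st.1 > 0 then 1 else 0)) - res := by
  induction l with
  | nil =>
    intro cur acc seq res h0 hc
    simp only [List.map_nil, PySem.Chars.split₀.go, List.foldl_nil]
    by_cases hs : seq ≤ 0
    · rw [if_pos (by simp [hc, hs])]
      simp; omega
    · rw [if_neg (by simp [hc]; omega)]
      simp; omega
  | cons c t ih =>
    intro cur acc seq res h0 hc
    simp only [List.map_cons, List.foldl_cons]
    by_cases hd : c = '-'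
    · subst hd
      simp only [beq_self_eq_true, if_true, PySem.Chars.split₀.go]
      rw [if_neg (by decide)]
      rw [ih ('-' :: cur) acc (seq + 1) res (by omega) (by simp; omega)]
    · have hb : (c == '-') = false := by simp [hd]
      simp only [hb, Bool.false_eq_true, if_false, PySem.Chars.split₀.go]
      rw [if_pos (by simp [PySem.Chars.isspace])]
      by_cases hs : seq ≤ 0
      · rw [if_pos (by simp [hc, hs])]
        rw [ih [] acc 0 (res + if seq > 0 then 1 else 0) le_rfl (by simp)]
        have : ¬ (seq > 0) := by omega
        simp [this]
      · rw [if_neg (by simp [hc]; omega)]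
        rw [ih [] (cur.reverse :: acc) 0 (res + if seq > 0 then 1 else 0) le_rfl (by simp)]
        have : seq > 0 := by omega
        simp [this]
        omega

-- ===== VERDICT =====
theorem count_blank_groups_spec : Claim_equal_count_blank_groups := by
  intro str _
  unfold Spec_count_blank_groups count_blank_groups count_blank_groups_alt
  have h := pv_go str.toList [] [] 0 0 le_rfl (by simp)
  simp only [PySem.Chars.split₀]
  simp only [List.length_nil, Nat.cast_zero] at h
  rw [h]
  norm_num
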